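-- pv_equiv track=rewrite | github.com/AmarBhatt/RIT_Thesis | Proposed Architecture/task_generator.py | find_obstacles
-- ===== SOURCE A (Python) =====
-- def find_obstacles(maze):
--     obstacles = []
--     goal = 0
--     count = 0
--     for y in range(len(maze)):
--         for x in range(len(maze[0])):
--             if(maze[y][x] == -1):
--                 obstacles.append(count)
--             if(maze[y][x] > 0):
--                 goal = count
--             count += 1
--
--     return obstacles, goal
-- ===== SOURCE B (Python) =====
-- def find_obstacles(maze):
--     w = len(maze[0]) if maze else 0
--     flat = [v for row in maze for v in row[:w]]
--     obstacles = [i for i, v in enumerate(flat) if v == -1]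
--     goal = 0
--     for i in range(len(flat) - 1, -1, -1):
--         if flat[i] > 0:
--             goal = i
--             break
--     return obstacles, goal
-- ===== Notes on version B (the rewrite author's own statement) =====
-- stated objective: alternative
-- what changed: Replaces A's nested index loops with a manual running counter by: flatten the grid once (each row clipped to the first row's width), collect obstacle indices with one enumerate-filter pass, and find the goal by scanning indices from the back with early exit instead of overwriting a variable in a forward pass.
import Mathlib
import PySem

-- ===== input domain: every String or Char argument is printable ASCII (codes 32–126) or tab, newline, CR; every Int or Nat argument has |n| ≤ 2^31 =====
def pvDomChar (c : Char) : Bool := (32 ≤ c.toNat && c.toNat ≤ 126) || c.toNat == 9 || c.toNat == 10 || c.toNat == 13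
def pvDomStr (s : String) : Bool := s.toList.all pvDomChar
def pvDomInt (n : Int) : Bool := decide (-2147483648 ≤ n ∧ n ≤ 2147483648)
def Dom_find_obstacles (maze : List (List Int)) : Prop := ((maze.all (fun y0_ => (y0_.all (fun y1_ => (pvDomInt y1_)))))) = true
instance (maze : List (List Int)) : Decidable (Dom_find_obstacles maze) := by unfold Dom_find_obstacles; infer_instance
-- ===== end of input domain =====

-- B flattens the grid (rows clipped to the first row's width) and makes two passes:
-- an enumerate-filter pass for obstacles and a backwards early-exit scan for the goal.
-- Alternative decomposition, same cost; return-value equivalence only (no mutation in A).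

-- ===== PORT A =====
def find_obstacles (maze : List (List Int)) : List Int × Int :=
  let st := (PySem.List.pyRange 0 maze.length 1).foldl (fun st y =>
    (PySem.List.pyRange 0 (PySem.List.pyGetD maze 0 []).length 1).foldl (fun st x =>
      let v := PySem.List.pyGetD (PySem.List.pyGetD maze y []) x 0
      let obstacles := if v = -1 then st.1 ++ [st.2.2] else st.1
      let goal := if v > 0 then st.2.2 else st.2.1
      (obstacles, goal, st.2.2 + 1)) st) ([], 0, 0)
  (st.1, st.2.1)

-- ===== PORT B =====
def find_obstacles_alt (maze : List (List Int)) : List Int × Int :=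
  let w : Int := if maze = [] then 0 else ((PySem.List.pyGetD maze 0 []).length : Int)
  let flat : List Int := maze.foldl (fun acc row => acc ++ PySem.List.slice row none (some w)) []
  let obstacles : List Int := ((PySem.List.enumerate flat 0).filter (fun p => p.2 == -1)).map (·.1)
  let goal : Int :=
    match (PySem.List.pyRange ((flat.length : Int) - 1) (-1) (-1)).find?
        (fun i => decide (0 < PySem.List.pyGetD flat i 0)) with
    | some i => i
    | none => 0
  (obstacles, goal)

-- ===== PRECONDITION & SPEC =====
-- Pre_ excludes exactly the ragged mazes on which A raises IndexError: a row shorter than the first row.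
def Pre_find_obstacles (maze : List (List Int)) : Prop :=
  ∀ row ∈ maze, (maze.headD []).length ≤ row.length
instance (maze : List (List Int)) : Decidable (Pre_find_obstacles maze) := by unfold Pre_find_obstacles; infer_instance
def pvWitness_find_obstacles : List (List Int) := [[0, -1], [3, 0]]

def Spec_find_obstacles (maze : List (List Int)) (out : List Int × Int) : Prop := out = find_obstacles_alt maze
instance (maze : List (List Int)) (out : List Int × Int) : Decidable (Spec_find_obstacles maze out) := by unfold Spec_find_obstacles; infer_instance

-- ===== CLAIM (what is proved, stated in full; the proofs are below) =====
def Claim_equal_find_obstacles : Prop := ∀ (maze : List (List Int)), Dom_find_obstacles maze → Pre_find_obstacles maze → Spec_find_obstacles maze (find_obstacles maze)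


-- ===== LEMMAS AND PROOFS =====

-- A's loop body as a step function over one cell value (proof helper)
def pvStep (st : List Int × Int × Int) (v : Int) : List Int × Int × Int :=
  (if v = -1 then st.1 ++ [st.2.2] else st.1, if v > 0 then st.2.2 else st.2.1, st.2.2 + 1)

-- last index (with offset c) holding a positive value, else g (proof helper)
def pvLastGoal (L : List Int) (c g : Int) : Int :=
  match ((PySem.List.enumerate L c).reverse.find? (fun p => decide (0 < p.2))) with
  | some p => p.1
  | none => g

theorem pvGetD_zero {α : Type} (xs : List α) (d : α) :
    PySem.List.pyGetD xs 0 d = xs.headD d := by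
  cases xs <;> simp [PySem.List.pyGetD, PySem.List.pyGet?, PySem.List.pyIdx?]

theorem pvStep_obs (L : List Int) (obs : List Int) (g c : Int) :
    (L.foldl pvStep (obs, g, c)).1
      = obs ++ ((PySem.List.enumerate L c).filter (fun p => p.2 == -1)).map (·.1) := by
  induction L generalizing obs g c with
  | nil => simp [PySem.List.enumerate_nil]
  | cons v L ih =>
    rw [List.foldl_cons, PySem.List.enumerate_cons]
    show (L.foldl pvStep (pvStep (obs, g, c) v)).1 = _
    by_cases hv : v = -1 <;> simp [pvStep, hv, ih]

theorem pvStep_goal (L : List Int) (obs : List Int) (g c : Int) :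
    (L.foldl pvStep (obs, g, c)).2.1 = pvLastGoal L c g := by
  induction L generalizing obs g c with
  | nil => simp [pvLastGoal, PySem.List.enumerate_nil]
  | cons v L ih =>
    rw [List.foldl_cons]
    show (L.foldl pvStep (pvStep (obs, g, c) v)).2.1 = _
    have : pvStep (obs, g, c) v
        = (if v = -1 then obs ++ [c] else obs, if v > 0 then c else g, c + 1) := rfl
    rw [this, ih]
    unfold pvLastGoal
    rw [PySem.List.enumerate_cons, List.reverse_cons, List.find?_append]
    cases hf : (PySem.List.enumerate L (c + 1)).reverse.find? (fun p => decide (0 < p.2)) with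
    | some p => simp
    | none => by_cases hv : 0 < v <;> simp [hv]

-- B's backwards scan computes pvLastGoal
theorem pvAltGoal (L : List Int) :
    (match (PySem.List.pyRange ((L.length : Int) - 1) (-1) (-1)).find?
        (fun i => decide (0 < PySem.List.pyGetD L i 0)) with
     | some i => i
     | none => 0) = pvLastGoal L 0 0 := by
  unfold pvLastGoal
  rw [PySem.List.pyRange_neg_one_eq_reverse]
  have hb : ((-1 : Int) + 1) = 0 := by norm_num
  have ha : ((L.length : Int) - 1 + 1) = (L.length : Int) := by ring
  rw [hb, ha, PySem.List.enumerate_eq_map_pyRange L 0, ← List.map_reverse, List.find?_map]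
  have hlen : PySem.List.len L = (L.length : Int) := by simp [PySem.List.len]
  have hcomp : ((fun p => decide ((0:Int) < p.2)) ∘ fun j => (j, PySem.List.pyGetD L j 0))
      = (fun i => decide (0 < PySem.List.pyGetD L i 0)) := rfl
  rw [hlen, hcomp]
  cases hf : (PySem.List.pyRange 0 ((L.length : Int))).reverse.find?
      (fun i => decide (0 < PySem.List.pyGetD L i 0)) with
  | some i => simp
  | none => simp

-- the inner x-loop over one row equals a fold over the row clipped to width W
theorem pvInner (row : List Int) (W : Nat) (h : W ≤ row.length) (st : List Int × Int × Int) :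
    (PySem.List.pyRange 0 (W : Int)).foldl (fun st x => pvStep st (PySem.List.pyGetD row x 0)) st
      = (row.take W).foldl pvStep st := by
  have hlen : (row.take W).length = W := by simp [h]
  have hcongr : (PySem.List.pyRange 0 (W : Int)).foldl
      (fun st x => pvStep st (PySem.List.pyGetD row x 0)) st
      = (PySem.List.pyRange 0 (W : Int)).foldl
      (fun st x => pvStep st (PySem.List.pyGetD (row.take W) x 0)) st := by
    apply PySem.List.foldl_congr_mem
    intro acc x hx
    rcases PySem.List.mem_pyRange_one.mp hx with ⟨hx0, hxW⟩
    rw [PySem.List.pyGetD_eq_getElem row 0 hx0 (by omega),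
        PySem.List.pyGetD_eq_getElem (row.take W) 0 hx0 (by omega : x < ((row.take W).length : Int)),
        List.getElem_take]
  have hW : (W : Int) = ((row.take W).length : Int) := by rw [hlen]
  rw [hcongr, hW]
  exact PySem.List.foldl_pyRange_zero_pyGetD' (row.take W) 0 pvStep st

theorem pvFoldFlat (rows : List (List Int)) (W : Nat) (init : List Int × Int × Int) :
    rows.foldl (fun st row => (row.take W).foldl pvStep st) init
      = (rows.flatMap (fun row => row.take W)).foldl pvStep init := by
  induction rows generalizing init with
  | nil => simp
  | cons r rows ih => simp [List.foldl_cons, List.flatMap_cons, List.foldl_append, ih]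

-- A equals the flat fold under Pre_
theorem pvA_flat (maze : List (List Int)) (hpre : Pre_find_obstacles maze) :
    find_obstacles maze
      = (let L := maze.flatMap (fun row => row.take (maze.headD []).length)
         ((L.foldl pvStep ([], 0, 0)).1, (L.foldl pvStep ([], 0, 0)).2.1)) := by
  unfold find_obstacles
  simp only [pvGetD_zero]
  have houter : (PySem.List.pyRange 0 (maze.length : Int)).foldl
      (fun st y => (PySem.List.pyRange 0 ((maze.headD []).length : Int)).foldl
        (fun st x =>
          let v := PySem.List.pyGetD (PySem.List.pyGetD maze y []) x 0
          (if v = -1 then st.1 ++ [st.2.2] else st.1,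
           if v > 0 then st.2.2 else st.2.1, st.2.2 + 1)) st) ([], 0, 0)
      = maze.foldl (fun st row => (row.take (maze.headD []).length).foldl pvStep st) ([], 0, 0) := by
    have h1 := PySem.List.foldl_pyRange_zero_pyGetD' maze []
      (fun st row => (PySem.List.pyRange 0 ((maze.headD []).length : Int)).foldl
        (fun st x => pvStep st (PySem.List.pyGetD row x 0)) st) ([], 0, 0)
    rw [show (fun (st : List Int × Int × Int) (y : Int) =>
        (PySem.List.pyRange 0 ((maze.headD []).length : Int)).foldl
          (fun st x =>
            let v := PySem.List.pyGetD (PySem.List.pyGetD maze y []) x 0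
            (if v = -1 then st.1 ++ [st.2.2] else st.1,
             if v > 0 then st.2.2 else st.2.1, st.2.2 + 1)) st)
      = (fun (st : List Int × Int × Int) (y : Int) =>
        (PySem.List.pyRange 0 ((maze.headD []).length : Int)).foldl
          (fun st x => pvStep st (PySem.List.pyGetD (PySem.List.pyGetD maze y []) x 0)) st) from rfl]
    rw [h1]
    apply PySem.List.foldl_congr_mem
    intro acc row hrow
    exact pvInner row _ (hpre row hrow) acc
  rw [houter, pvFoldFlat]

-- B equals the same flat fold's characterisations
theorem pvB_flat (maze : List (List Int)) :
    find_obstacles_alt maze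
      = (let L := maze.flatMap (fun row => row.take (maze.headD []).length)
         (((PySem.List.enumerate L 0).filter (fun p => p.2 == -1)).map (·.1),
          match (PySem.List.pyRange ((L.length : Int) - 1) (-1) (-1)).find?
              (fun i => decide (0 < PySem.List.pyGetD L i 0)) with
          | some i => i
          | none => 0)) := by
  unfold find_obstacles_alt
  simp only [pvGetD_zero]
  cases maze with
  | nil => simp [PySem.List.enumerate_nil]
  | cons r rows =>
    have hflat : ((r :: rows).foldl
        (fun acc row => acc ++ PySem.List.slice row none (some ((r.length : Nat) : Int))) [])
        = (r :: rows).flatMap (fun row => row.take r.length) := by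
      rw [PySem.List.foldl_append_eq_flatMap]
      simp only [List.nil_append]
      apply List.flatMap_congr
      intro row _
      exact PySem.List.slice_to_natCast row r.length
    simp only [List.headD_cons]
    rw [if_neg (List.cons_ne_nil r rows), hflat]
    rfl


-- ===== VERDICT (by name: the statement is the Claim_ definition above) =====
theorem find_obstacles_spec : Claim_equal_find_obstacles := by
  intro maze _ hpre
  unfold Spec_find_obstacles
  rw [pvA_flat maze hpre, pvB_flat maze]
  simp only []
  refine Prod.ext ?_ ?_
  · simpa using (pvStep_obs _ [] 0 0)
  · simp only
    rw [pvStep_goal _ [] 0 0, pvAltGoal]
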